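-- pv_equiv track=rewrite | github.com/harry1003/MLDS_hw2 | hw2-2/predict.py | out_process
-- ===== SOURCE A (Python) =====
-- def out_process(sent):
--     new_sent = ''
--     temp_word = 0
--     for i in range(len(sent)):
--         if sent[i] == '<eos>':
--             return new_sent
--         if temp_word == sent[i] or sent[i]=='<pad>' or sent[i]=='<unk>':
--             temp_word = sent[i]
--         else:
--             temp_word = sent[i]
--             new_sent = new_sent + sent[i] + ' '
--     return new_sent
-- ===== SOURCE B (Python) =====
-- def out_process(sent):
--     # Backward index scan: find the cut at the first '<eos>', then walk the indices
--     # cut-1 .. 0, emitting sent[i] when it is not '<pad>'/'<unk>' and differs from its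
--     # left neighbour; the words are collected back-to-front, reversed once, joined once.
--     try:
--         cut = sent.index('<eos>')
--     except ValueError:
--         cut = len(sent)
--     out = []
--     for i in range(cut - 1, -1, -1):
--         w = sent[i]
--         if w != '<pad>' and w != '<unk>' and (i == 0 or sent[i - 1] != w):
--             out.append(w)
--     out.reverse()
--     return ''.join(w + ' ' for w in out)
-- ===== Notes on version B (the rewrite author's own statement) =====
-- stated objective: faster
-- what changed: Replaces A's forward loop with threaded mutable state (temp_word carrying the last token incl. pad/unk, early return, repeated string concatenation) by a stateless backward index scan: cut at the first <eos> via index(), walk indices cut-1..0 comparing each token with its left neighbour sent[i-1] instead of carried state, collect the kept words back-to-front, reverse once and join once.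
import Mathlib
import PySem

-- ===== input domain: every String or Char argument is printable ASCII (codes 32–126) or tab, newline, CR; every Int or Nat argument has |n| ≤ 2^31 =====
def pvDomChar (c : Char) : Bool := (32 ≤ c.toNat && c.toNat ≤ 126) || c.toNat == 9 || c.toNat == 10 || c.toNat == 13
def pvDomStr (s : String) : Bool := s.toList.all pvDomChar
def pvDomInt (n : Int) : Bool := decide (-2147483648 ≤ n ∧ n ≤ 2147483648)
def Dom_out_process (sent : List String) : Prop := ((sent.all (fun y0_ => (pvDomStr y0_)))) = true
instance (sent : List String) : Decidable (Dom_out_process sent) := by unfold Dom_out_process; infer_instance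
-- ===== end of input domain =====

-- B replaces A's forward loop with threaded state (temp_word, early return, repeated concatenation)
-- by a stateless backward index scan comparing each token with its left neighbour, reversed and joined once.

-- ===== PORT A =====
-- loop over sent with state (new_sent, temp_word); temp_word starts as int 0 (never equal to a
-- string), modelled as Option String with none initially; '<eos>' triggers the early return.
def outProcessGo : List String → String → Option String → String
  | [], acc, _ => acc
  | w :: rest, acc, temp =>
    if w = "<eos>" then acc
    else if temp = some w ∨ w = "<pad>" ∨ w = "<unk>" then outProcessGo rest acc (some w)
    else outProcessGo rest (acc ++ w ++ " ") (some w)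

def out_process (sent : List String) : String := outProcessGo sent "" none

-- ===== PORT B =====
-- cut = sent.index('<eos>') (ValueError -> len(sent)); then the backward loop
-- 'for i in range(cut-1, -1, -1)' appending kept words; out.reverse(); ''.join(w + ' ' ...).
-- indices i and i-1 are always in range (0 ≤ i < cut ≤ len), so pyGetD's default is never used.
def out_process_alt (sent : List String) : String :=
  let cut : Nat := match PySem.List.index? sent "<eos>" with
    | some i => i
    | none => sent.length
  let out : List String :=
    (PySem.List.pyRange ((cut : Int) - 1) (-1) (-1)).foldl (fun acc i =>
      if (PySem.List.pyGetD sent i "" != "<pad>")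
          && (PySem.List.pyGetD sent i "" != "<unk>")
          && ((i == 0) || (PySem.List.pyGetD sent (i - 1) "" != PySem.List.pyGetD sent i ""))
      then acc ++ [PySem.List.pyGetD sent i ""] else acc) []
  String.join (out.reverse.map (fun w => w ++ " "))

-- ===== PRECONDITION & SPEC =====
def Spec_out_process (sent : List String) (out : String) : Prop := out = out_process_alt sent
instance (sent : List String) (out : String) : Decidable (Spec_out_process sent out) := by unfold Spec_out_process; infer_instance

-- ===== CLAIM (what is proved, stated in full; the proofs are below) =====
def Claim_equal_out_process : Prop := ∀ (sent : List String), Dom_out_process sent → Spec_out_process sent (out_process sent)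

-- ===== LEMMAS AND PROOFS =====

-- collapse runs of consecutive equal tokens (prev = last raw token seen)
def pvDedup : Option String → List String → List String
  | _, [] => []
  | prev, w :: rest => if prev = some w then pvDedup (some w) rest else w :: pvDedup (some w) rest

def pvJoinSp : List String → String
  | [] => ""
  | w :: t => w ++ " " ++ pvJoinSp t

def pvS (prev : Option String) (l : List String) : String :=
  pvJoinSp ((pvDedup prev (l.takeWhile (fun w => !(w == "<eos>")))).filter
      (fun w => !(w == "<pad>" || w == "<unk>")))

theorem pvGo_eq (l : List String) : ∀ (prev : Option String) (acc : String),
    outProcessGo l acc prev = acc ++ pvS prev l := by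
  induction l with
  | nil => intro prev acc; simp [outProcessGo, pvS, pvDedup, pvJoinSp]
  | cons w rest ih =>
    intro prev acc
    by_cases he : w = "<eos>"
    · simp [outProcessGo, he, pvS, pvDedup, pvJoinSp]
    · by_cases hskip : prev = some w ∨ w = "<pad>" ∨ w = "<unk>"
      · rw [show outProcessGo (w :: rest) acc prev = outProcessGo rest acc (some w) by
          simp [outProcessGo, he]; tauto]
        rw [ih (some w) acc]
        rcases hskip with h | h | h
        · simp [pvS, he, pvDedup, h]
        · by_cases hp : prev = some w
          · simp [pvS, he, pvDedup, hp]
          · subst h; simp [pvS, pvDedup, hp]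
        · by_cases hp : prev = some w
          · simp [pvS, he, pvDedup, hp]
          · subst h; simp [pvS, pvDedup, hp]
      · rw [not_or, not_or] at hskip
        obtain ⟨h1, h2, h3⟩ := hskip
        rw [show outProcessGo (w :: rest) acc prev
              = outProcessGo rest (acc ++ w ++ " ") (some w) by
          simp [outProcessGo, he, h1, h2, h3]]
        rw [ih (some w) (acc ++ w ++ " ")]
        simp [pvS, he, pvDedup, pvJoinSp, h1, h2, h3, String.append_assoc]

theorem pvFoldl_shift (t : List String) : ∀ (a : String),
    List.foldl (fun r s => r ++ s) a t = a ++ List.foldl (fun r s => r ++ s) "" t := by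
  induction t with
  | nil => intro a; simp
  | cons x t ih =>
    intro a
    rw [List.foldl_cons, ih (a ++ x), List.foldl_cons, ih ("" ++ x)]
    simp [String.append_assoc]

theorem pvJoin_cons (a : String) (l : List String) :
    String.join (a :: l) = a ++ String.join l := by
  simp only [String.join, List.foldl_cons]
  rw [pvFoldl_shift]
  simp

theorem pvJoin_eq (ys : List String) :
    String.join (ys.map (fun w => w ++ " ")) = pvJoinSp ys := by
  induction ys with
  | nil => simp [String.join, pvJoinSp]
  | cons w t ih => simp [pvJoin_cons, ih, pvJoinSp, String.append_assoc]

theorem pvCut_eq (l : List String) :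
    l.take (match PySem.List.index? l "<eos>" with | some i => i | none => l.length)
      = l.takeWhile (fun w => !(w == "<eos>")) := by
  induction l with
  | nil => simp
  | cons w rest ih =>
    by_cases he : w = "<eos>"
    · subst he
      rw [PySem.List.index?_cons_self]
      simp
    · rw [PySem.List.index?_cons_of_ne rest he]
      cases h : PySem.List.index? rest "<eos>" with
      | none =>
        rw [h] at ih
        simp only [Option.map_none, List.length_cons]
        simp [he, ih]
      | some i =>
        rw [h] at ih
        simp only [Option.map_some]
        simp [he, List.take_succ_cons, ih]

-- the per-index keep condition, phrased on a list l with an explicit previous token p for index 0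
def pvCond (l : List String) (p : Option String) (k : Nat) : Bool :=
  (l.getD k "" != "<pad>") && (l.getD k "" != "<unk>")
    && (match k with
        | 0 => !(p == some (l.getD 0 ""))
        | k' + 1 => l.getD k' "" != l.getD (k' + 1) "")

theorem pvIdx_eq (l : List String) : ∀ (p : Option String),
    ((List.range l.length).filter (pvCond l p)).map (fun k => l.getD k "")
      = (pvDedup p l).filter (fun w => !(w == "<pad>" || w == "<unk>")) := by
  induction l with
  | nil => intro p; simp [pvDedup]
  | cons w rest ih =>
    intro p
    have hshift : ∀ k : Nat, pvCond (w :: rest) p (k + 1) = pvCond rest (some w) k := by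
      intro k
      cases k with
      | zero => simp [pvCond, bne]
      | succ k' => simp [pvCond]
    have hmap : ((List.range rest.length).map Nat.succ).filter (pvCond (w :: rest) p)
        = ((List.range rest.length).filter (pvCond rest (some w))).map Nat.succ := by
      rw [List.filter_map]
      congr 1
      apply List.filter_congr
      intro k _
      exact hshift k
    by_cases hp : p = some w
    · have hc0 : pvCond (w :: rest) p 0 = false := by simp [pvCond, hp]
      rw [show (w :: rest).length = rest.length + 1 from rfl, List.range_succ_eq_map,
        List.filter_cons, if_neg (by simp [hc0]), hmap, List.map_map]
      rw [show ((fun k => (w :: rest).getD k "") ∘ Nat.succ) = (fun k => rest.getD k "") from rfl]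
      rw [ih (some w)]
      simp [pvDedup, hp]
    · rw [show (w :: rest).length = rest.length + 1 from rfl, List.range_succ_eq_map,
        List.filter_cons]
      have hc0 : pvCond (w :: rest) p 0
          = ((w != "<pad>") && (w != "<unk>")) := by
        simp only [pvCond]
        simp [hp]
      by_cases hw : (w != "<pad>") && (w != "<unk>")
      · rw [if_pos (by simp [hc0, hw])]
        rw [List.map_cons, hmap, List.map_map]
        rw [show ((fun k => (w :: rest).getD k "") ∘ Nat.succ) = (fun k => rest.getD k "") from rfl]
        rw [ih (some w)]
        simp only [Bool.and_eq_true, bne_iff_ne, ne_eq] at hw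
        simp [pvDedup, hp, hw.1, hw.2]
      · rw [if_neg (by simp [hc0]; simpa using hw)]
        rw [hmap, List.map_map]
        rw [show ((fun k => (w :: rest).getD k "") ∘ Nat.succ) = (fun k => rest.getD k "") from rfl]
        rw [ih (some w)]
        simp only [Bool.and_eq_true, bne_iff_ne, ne_eq, not_and, not_not] at hw
        by_cases hpad : w = "<pad>"
        · simp only [pvDedup, hpad]
          split_ifs <;> simp
        · simp only [pvDedup, hw hpad]
          split_ifs <;> simp

-- B's Int-index condition over sent agrees with pvCond on the take-prefix
theorem pvCond_cast (sent : List String) (cut : Nat) (hcut : cut ≤ sent.length) (k : Nat)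
    (hk : k < cut) :
    ((PySem.List.pyGetD sent (k : Int) "" != "<pad>")
      && (PySem.List.pyGetD sent (k : Int) "" != "<unk>")
      && (((k : Int) == 0) || (PySem.List.pyGetD sent ((k : Int) - 1) "" != PySem.List.pyGetD sent (k : Int) "")))
    = pvCond (sent.take cut) none k := by
  have hget : ∀ j : Nat, j < cut → PySem.List.pyGetD sent (j : Int) "" = (sent.take cut).getD j "" := by
    intro j hj
    rw [PySem.List.pyGetD_natCast]
    have hj' : j < sent.length := lt_of_lt_of_le hj hcut
    rw [List.getD_eq_getElem?_getD, List.getD_eq_getElem?_getD,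
      List.getElem?_take_of_lt hj]
  cases k with
  | zero =>
    simp only [pvCond]
    rw [hget 0 hk]
    simp
  | succ k' =>
    have h1 : ((k' + 1 : Nat) : Int) - 1 = (k' : Nat) := by push_cast; ring
    simp only [pvCond]
    rw [h1, hget (k' + 1) hk, hget k' (Nat.lt_of_succ_lt hk)]
    have hne : (((k' + 1 : Nat) : Int) == 0) = false := by
      rw [beq_eq_false_iff_ne]
      push_cast
      omega
    rw [hne]
    simp

theorem pvAlt_eq (sent : List String) : out_process_alt sent = pvS none sent := by
  simp only [out_process_alt]
  set cutN : Nat := (match PySem.List.index? sent "<eos>" with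
    | some i => i
    | none => sent.length) with hcut_def
  have hcut_le : cutN ≤ sent.length := by
    rw [hcut_def]
    cases h : PySem.List.index? sent "<eos>" with
    | none => exact le_refl _
    | some i =>
      obtain ⟨hk, -, -⟩ := PySem.List.getElem_of_index?_eq_some h
      exact le_of_lt hk
  rw [PySem.List.pyRange_neg_one_eq_reverse,
    show (-1 : Int) + 1 = 0 by ring, show ((cutN : Int) - 1) + 1 = (cutN : Int) by ring,
    PySem.List.pyRange_zero_natCast]
  rw [PySem.List.foldl_append_if
    (fun i => (PySem.List.pyGetD sent i "" != "<pad>")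
      && (PySem.List.pyGetD sent i "" != "<unk>")
      && (((i : Int) == 0) || (PySem.List.pyGetD sent (i - 1) "" != PySem.List.pyGetD sent i "")))
    (fun i => PySem.List.pyGetD sent i "")]
  simp only [List.nil_append, List.filter_reverse, List.map_reverse, List.reverse_reverse]
  simp only [List.filter_map, Function.comp_def]
  have hget : ∀ k : Nat, k < cutN → PySem.List.pyGetD sent (k : Int) "" = (sent.take cutN).getD k "" := by
    intro k hk
    rw [PySem.List.pyGetD_natCast]
    rw [List.getD_eq_getElem?_getD, List.getD_eq_getElem?_getD, List.getElem?_take_of_lt hk]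
  rw [List.filter_congr (fun k hk => pvCond_cast sent cutN hcut_le k (List.mem_range.mp hk))]
  rw [List.map_map, List.map_map]
  simp only [Function.comp_def]
  rw [List.map_congr_left
    (fun k hk => congrArg (fun w => w ++ " ")
      (hget k (List.mem_range.mp (List.mem_of_mem_filter hk))))]
  rw [show (fun k => (sent.take cutN).getD k "" ++ " ")
        = ((fun w => w ++ " ") ∘ (fun k => (sent.take cutN).getD k "")) from rfl,
    ← List.map_map]
  have hlen : (sent.take cutN).length = cutN := by simp [hcut_le]
  have hidx := pvIdx_eq (sent.take cutN) none
  rw [hlen] at hidx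
  rw [hidx, pvJoin_eq]
  have htake : sent.take cutN = sent.takeWhile (fun w => !(w == "<eos>")) := by
    rw [hcut_def]; exact pvCut_eq sent
  rw [pvS, htake]
-- ===== VERDICT (by name: the statement is the Claim_ definition above) =====
theorem out_process_spec : Claim_equal_out_process := by
  intro sent _
  unfold Spec_out_process
  rw [pvAlt_eq]
  simpa using pvGo_eq sent none ""
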